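-- pv_equiv track=rewrite | github.com/spacexffdarkness/Study | Lesson10.py | changing_str_list
-- ===== SOURCE A (Python) =====
-- def changing_str_list(my_list):
--     """Функция возвращает новый список в котором содержаться
--        элементы из my_list по следующему правилу:
--        Если строка стоит на нечетном месте в my_list, то ее заменить на
--        перевернутую строку. "qwe" на "ewq".
--        Если на четном - оставить без изменения."""
--     new_list = []
--     index = 0
--     for i in my_list:
--         if index % 2 == 0:
--             rev = i[::-1]
--             new_list.append(rev)
--         else:
--             new_list.append(i)
--         index += 1
--     return new_list
-- ===== SOURCE B (Python) =====
-- def changing_str_list(my_list):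
--     new_list = list(my_list)
--     new_list[::2] = [s[::-1] for s in my_list[::2]]
--     return new_list
-- ===== Notes on version B (the rewrite author's own statement) =====
-- stated objective: alternative
-- what changed: Replaces the indexed loop with a per-element parity branch by two strided slice operations: gather the even-indexed strings with my_list[::2], reverse each, and write them back with slice assignment into a copy of the list.
import Mathlib
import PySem

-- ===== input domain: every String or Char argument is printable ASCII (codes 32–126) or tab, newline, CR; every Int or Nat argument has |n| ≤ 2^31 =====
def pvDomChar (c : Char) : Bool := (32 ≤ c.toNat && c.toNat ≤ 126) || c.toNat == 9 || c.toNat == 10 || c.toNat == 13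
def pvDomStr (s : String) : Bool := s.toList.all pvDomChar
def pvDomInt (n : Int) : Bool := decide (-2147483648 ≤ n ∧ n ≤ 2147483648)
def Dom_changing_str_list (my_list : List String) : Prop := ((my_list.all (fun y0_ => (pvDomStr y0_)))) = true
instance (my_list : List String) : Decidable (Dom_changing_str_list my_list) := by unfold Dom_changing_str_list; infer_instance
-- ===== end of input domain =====

-- B replaces the indexed loop with a per-element parity branch by two strided slice
-- operations (gather my_list[::2], reverse each, write back by slice assignment);
-- objective: alternative decomposition (not claimed faster).

-- shared helper: Python's s[::-1] (both sources use the same expression)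
def pvRev (s : String) : String := (PySem.Str.slice? s none none (-1)).getD ""

-- ===== PORT A =====
def changing_str_list (my_list : List String) : List String :=
  (my_list.foldl
    (fun (st : List String × Int) i =>
      if PySem.Int.mod st.2 2 = 0 then
        (st.1 ++ [pvRev i], st.2 + 1)
      else
        (st.1 ++ [i], st.2 + 1))
    ([], 0)).1

-- ===== PORT B =====
-- hand port of the strided slice assignment 'new_list[::2] = vals': exact when vals has
-- exactly the length of new_list[::2], which holds for Source B's right-hand side
def pvSetEven : List String → List String → List String
  | v :: vs, _ :: y :: rest => v :: y :: pvSetEven vs rest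
  | v :: _, [_] => [v]
  | _, xs => xs

-- 'new_list = list(my_list)' is a copy, which for an immutable value is my_list itself
def changing_str_list_alt (my_list : List String) : List String :=
  pvSetEven (((PySem.List.slice? my_list none none 2).getD []).map pvRev) my_list

-- ===== PRECONDITION & SPEC =====
def Spec_changing_str_list (my_list : List String) (out : List String) : Prop := out = changing_str_list_alt my_list
instance (my_list : List String) (out : List String) : Decidable (Spec_changing_str_list my_list out) := by unfold Spec_changing_str_list; infer_instance

-- ===== CLAIM (what is proved, stated in full; the proofs are below) =====
def Claim_equal_changing_str_list : Prop := ∀ (my_list : List String), Dom_changing_str_list my_list → Spec_changing_str_list my_list (changing_str_list my_list)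

-- ===== LEMMAS AND PROOFS =====

-- even-indexed elements: what my_list[::2] denotes (proof-side characterisation)
def pvEvens {α : Type} : List α → List α
  | [] => []
  | [x] => [x]
  | x :: _ :: r => x :: pvEvens r

theorem pv_fm {α : Type} : ∀ (xs : List α),
    List.filterMap (fun x : Nat => xs[((2:Int) * ↑x).toNat]?)
      (List.range (if 0 < xs.length then (((xs.length:Int) + 2 - 1)/2).toNat else 0)) = pvEvens xs := by
  intro xs
  induction xs using pvEvens.induct with
  | case1 => simp [pvEvens]
  | case2 x => simp [pvEvens, List.range_succ]
  | case3 a b r ih =>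
      have hc : (if 0 < (a :: b :: r).length then ((((a :: b :: r).length : Int) + 2 - 1)/2).toNat else 0)
          = (if 0 < r.length then (((r.length : Int) + 2 - 1)/2).toNat else 0) + 1 := by
        by_cases h : 0 < r.length <;> simp [h] <;> omega
      rw [hc, List.range_succ_eq_map, List.filterMap_cons, List.filterMap_map]
      have hstep : (fun k : Nat => (a :: b :: r)[((2:Int) * ↑(Nat.succ k)).toNat]?)
          = fun k : Nat => r[((2:Int) * ↑k).toNat]? := by
        funext k
        have h2 : ((2:Int) * ↑(Nat.succ k)).toNat = ((2:Int) * ↑k).toNat + 2 := by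
          push_cast; omega
        rw [h2]
        simp
      simp only [Function.comp_def]
      rw [show (fun k : Nat => (a :: b :: r)[((2:Int) * ↑(Nat.succ k)).toNat]?) = _ from hstep]
      simp [pvEvens, ih]

theorem pv_slice2 {α : Type} (xs : List α) : PySem.List.slice? xs none none 2 = some (pvEvens xs) := by
  simp only [PySem.List.slice?, PySem.List.sliceIndices]
  norm_num
  exact pv_fm xs

theorem pv_fold_eq_setEven (xs : List String) : ∀ (acc : List String) (k : Int),
    PySem.Int.mod k 2 = 0 →
    (xs.foldl
      (fun (st : List String × Int) i =>
        if PySem.Int.mod st.2 2 = 0 then (st.1 ++ [pvRev i], st.2 + 1)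
        else (st.1 ++ [i], st.2 + 1)) (acc, k)).1
      = acc ++ pvSetEven ((pvEvens xs).map pvRev) xs := by
  induction xs using pvEvens.induct with
  | case1 => intro acc k _; simp [pvEvens, pvSetEven]
  | case2 x =>
      intro acc k hk
      have hd : (2:Int) ∣ k := (PySem.Int.mod_eq_zero_iff_dvd k 2).mp hk
      simp [pvEvens, pvSetEven, hd]
  | case3 x y rest ih =>
      intro acc k hk
      have hk1 : ¬ PySem.Int.mod (k + 1) 2 = 0 := by
        have hd := (PySem.Int.mod_eq_zero_iff_dvd k 2).mp hk
        rw [PySem.Int.mod_eq_zero_iff_dvd]; omega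
      have hk2 : PySem.Int.mod (k + 1 + 1) 2 = 0 :=
        (PySem.Int.mod_eq_zero_iff_dvd (k + 1 + 1) 2).mpr
          (by have hd := (PySem.Int.mod_eq_zero_iff_dvd k 2).mp hk; omega)
      have h := ih (acc ++ [pvRev x] ++ [y]) (k + 1 + 1) hk2
      simp only [List.foldl_cons, hk, hk1, reduceIte]
      rw [h]
      simp [pvEvens, pvSetEven]

-- ===== VERDICT (by name: the statement is the Claim_ definition above) =====
theorem changing_str_list_spec : Claim_equal_changing_str_list := by
  intro my_list _
  unfold Spec_changing_str_list changing_str_list changing_str_list_alt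
  rw [pv_slice2]
  simpa using pv_fold_eq_setEven my_list [] 0 (by decide)
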